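-- pv_equiv track=rewrite | github.com/Mikko1o/Dynamic_programming | lis.py | lengths_of_lis
-- ===== SOURCE A (Python) =====
-- def lengths_of_lis(a):
--     assert isinstance(a, list)
--     lenghts = [0] * a.__len__()
--     for j, v in enumerate(a):
--         i = 0
--         maximum = 0
--         while i < j:
--             if a[i] < a[j]:
--                 if lenghts[i] > maximum:
--                     maximum = lenghts[i]
--             i = i + 1
--         lenghts[j] = maximum + 1
--     return lenghts
-- ===== SOURCE B (Python) =====
-- def lengths_of_lis(a):
--     # Patience sorting: tails[k] = smallest tail of an increasing run of length k+1.
--     # The LIS length ending at v is (number of tails < v) + 1.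
--     tails = []
--     out = []
--     for v in a:
--         k = 0
--         for t in tails:
--             if t < v:
--                 k = k + 1
--         if k == len(tails):
--             tails.append(v)
--         else:
--             tails[k] = v
--         out.append(k + 1)
--     return out
-- ===== Notes on version B (the rewrite author's own statement) =====
-- stated objective: alternative
-- what changed: Replaced A's per-index rescan of the whole prefix by patience sorting: B maintains a 'tails' list (smallest tail of an increasing run of each length) and the LIS length ending at v is the number of tails smaller than v.
import Mathlib
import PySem

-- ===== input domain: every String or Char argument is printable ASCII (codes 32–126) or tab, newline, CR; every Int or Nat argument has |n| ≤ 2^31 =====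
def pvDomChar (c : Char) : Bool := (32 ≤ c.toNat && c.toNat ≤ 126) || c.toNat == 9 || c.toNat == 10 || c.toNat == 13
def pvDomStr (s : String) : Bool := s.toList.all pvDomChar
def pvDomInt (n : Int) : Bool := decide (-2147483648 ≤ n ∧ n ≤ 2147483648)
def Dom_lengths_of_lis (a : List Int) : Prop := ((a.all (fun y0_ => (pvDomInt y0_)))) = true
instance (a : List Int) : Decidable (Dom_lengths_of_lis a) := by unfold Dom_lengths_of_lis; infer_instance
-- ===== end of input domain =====

-- B replaces A's quadratic per-index prefix rescan by patience sorting over a maintained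
-- 'tails' list (tails[k] = smallest tail of an increasing run of length k+1); same return value.

-- ===== PORT A =====
-- literal transliteration of A: outer for over indices, inner while as a fold over range j,
-- lenghts updated in place via List.set
def lengths_of_lis (a : List Int) : List Int :=
  (List.range a.length).foldl
    (fun lenghts j =>
      let maximum := (List.range j).foldl
        (fun maximum i =>
          if a.getD i 0 < a.getD j 0 then
            (if lenghts.getD i 0 > maximum then lenghts.getD i 0 else maximum)
          else maximum) 0
      lenghts.set j (maximum + 1))
    (List.replicate a.length 0)

-- ===== PORT B =====
-- transliteration of Source B: state (tails, out); k counts tails < v; then append or overwrite tails[k]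
def lengths_of_lis_alt (a : List Int) : List Int :=
  (a.foldl
    (fun (st : List Int × List Int) v =>
      let k : Int := st.1.foldl (fun k t => if t < v then k + 1 else k) 0
      let tails := if k = (st.1.length : Int) then st.1 ++ [v] else st.1.set k.toNat v
      (tails, st.2 ++ [k + 1]))
    ([], [])).2

-- ===== PRECONDITION & SPEC =====
def Spec_lengths_of_lis (a : List Int) (out : List Int) : Prop := out = lengths_of_lis_alt a
instance (a : List Int) (out : List Int) : Decidable (Spec_lengths_of_lis a out) := by unfold Spec_lengths_of_lis; infer_instance

-- ===== CLAIM (what is proved, stated in full; the proofs are below) =====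
def Claim_equal_lengths_of_lis : Prop := ∀ (a : List Int), Dom_lengths_of_lis a → Spec_lengths_of_lis a (lengths_of_lis a)

-- ===== LEMMAS AND PROOFS =====

-- reference DP: best p v = the running-max loop of A over already-processed (value, length) pairs
def bestStep (v m : Int) (ul : Int × Int) : Int :=
  if ul.1 < v then (if ul.2 > m then ul.2 else m) else m

def best (p : List (Int × Int)) (v : Int) : Int := p.foldl (bestStep v) 0

def pairsAux : List Int → List (Int × Int) → List (Int × Int)
  | [], p => p
  | v :: rest, p => pairsAux rest (p ++ [(v, best p v + 1)])

def dpOut : List Int → List (Int × Int) → List Int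
  | [], _ => []
  | v :: rest, p => (best p v + 1) :: dpOut rest (p ++ [(v, best p v + 1)])

theorem best_append (p : List (Int × Int)) (ul : Int × Int) (v : Int) :
    best (p ++ [ul]) v = bestStep v (best p v) ul := by
  simp [best, List.foldl_append]

theorem pairsAux_append (xs ys : List Int) (p : List (Int × Int)) :
    pairsAux (xs ++ ys) p = pairsAux ys (pairsAux xs p) := by
  induction xs generalizing p with
  | nil => simp [pairsAux]
  | cons v rest ih => simp [pairsAux, ih]

theorem pairsAux_fst (xs : List Int) (p : List (Int × Int)) :
    (pairsAux xs p).map Prod.fst = p.map Prod.fst ++ xs := by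
  induction xs generalizing p with
  | nil => simp [pairsAux]
  | cons v rest ih => simp [pairsAux, ih]

theorem pairsAux_length (xs : List Int) (p : List (Int × Int)) :
    (pairsAux xs p).length = p.length + xs.length := by
  induction xs generalizing p with
  | nil => simp [pairsAux]
  | cons v rest ih => simp [pairsAux, ih]; omega

theorem pairsAux_snd (xs : List Int) (p : List (Int × Int)) :
    (pairsAux xs p).map Prod.snd = p.map Prod.snd ++ dpOut xs p := by
  induction xs generalizing p with
  | nil => simp [pairsAux, dpOut]
  | cons v rest ih => simp [pairsAux, dpOut, ih]

-- A's inner while loop computes `best` of the zipped prefix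
theorem inner_eq (a L : List Int) (v : Int) :
    ∀ (j : Nat), j ≤ a.length → j ≤ L.length →
    (List.range j).foldl
      (fun maximum i =>
        if a.getD i 0 < v then
          (if L.getD i 0 > maximum then L.getD i 0 else maximum)
        else maximum) 0
    = best ((a.take j).zip (L.take j)) v := by
  intro j
  induction j with
  | zero => intro _ _; simp [best]
  | succ j ih =>
    intro h1 h2
    have hj1 : j < a.length := by omega
    have hj2 : j < L.length := by omega
    rw [List.range_succ, List.foldl_append, ih (by omega) (by omega)]
    have ta : a.take (j+1) = a.take j ++ [a[j]] := by
      rw [List.take_add_one]; simp [List.getElem?_eq_getElem hj1]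
    have tL : L.take (j+1) = L.take j ++ [L[j]] := by
      rw [List.take_add_one]; simp [List.getElem?_eq_getElem hj2]
    rw [ta, tL, List.zip_append (by simp; omega)]
    simp only [List.zip_cons_cons, List.zip_nil_right]
    rw [best_append]
    simp [bestStep, List.getD_eq_getElem?_getD, List.getElem?_eq_getElem hj1,
      List.getElem?_eq_getElem hj2]

theorem set_at_length (t1 : List Int) (x : Int) (t2 : List Int) (v : Int) :
    (t1 ++ x :: t2).set t1.length v = t1 ++ v :: t2 := by
  induction t1 with
  | nil => simp
  | cons y t ih => simp [ih]

-- A's outer loop invariant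
theorem A_inv (a : List Int) : ∀ (j : Nat), j ≤ a.length →
    (List.range j).foldl
      (fun lenghts j =>
        let maximum := (List.range j).foldl
          (fun maximum i =>
            if a.getD i 0 < a.getD j 0 then
              (if lenghts.getD i 0 > maximum then lenghts.getD i 0 else maximum)
            else maximum) 0
        lenghts.set j (maximum + 1))
      (List.replicate a.length 0)
    = (pairsAux (a.take j) []).map Prod.snd ++ List.replicate (a.length - j) 0 := by
  intro j
  induction j with
  | zero => intro _; simp [pairsAux]
  | succ j ih =>
    intro h1
    have hj : j < a.length := by omega
    rw [List.range_succ, List.foldl_append, ih (by omega)]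
    set P := pairsAux (a.take j) [] with hP
    have hfst : P.map Prod.fst = a.take j := by
      simpa using pairsAux_fst (a.take j) []
    have hlen : P.length = j := by
      have := pairsAux_length (a.take j) []
      rw [List.length_take] at this
      rw [hP, this]; simp; omega
    have hsndlen : (P.map Prod.snd).length = j := by simp [hlen]
    have hLlen : (P.map Prod.snd ++ List.replicate (a.length - j) 0).length = a.length := by
      simp [hsndlen]; omega
    -- the inner while loop computes best P (a.getD j 0)
    have hinner :
        (List.range j).foldl
          (fun maximum i =>
            if a.getD i 0 < a.getD j 0 then
              (if (P.map Prod.snd ++ List.replicate (a.length - j) 0).getD i 0 > maximum then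
                (P.map Prod.snd ++ List.replicate (a.length - j) 0).getD i 0
              else maximum)
            else maximum) 0 = best P (a.getD j 0) := by
      rw [inner_eq a (P.map Prod.snd ++ List.replicate (a.length - j) 0) (a.getD j 0) j
        (by omega) (by omega)]
      have h1 : (P.map Prod.snd ++ List.replicate (a.length - j) 0).take j = P.map Prod.snd := by
        rw [← hsndlen, List.take_left]
      have h2 : a.take j = P.map Prod.fst := hfst.symm
      rw [h1, h2, List.zip_map']
      simp
    simp only [List.foldl_cons, List.foldl_nil]
    rw [hinner]
    -- the set at index j extends the dp prefix
    have hset : (P.map Prod.snd ++ List.replicate (a.length - j) 0).set j (best P (a.getD j 0) + 1)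
        = (P.map Prod.snd ++ [best P (a.getD j 0) + 1]) ++ List.replicate (a.length - (j+1)) 0 := by
      have hrep : List.replicate (a.length - j) (0 : Int)
          = 0 :: List.replicate (a.length - (j+1)) 0 := by
        have : a.length - j = (a.length - (j+1)) + 1 := by omega
        rw [this, List.replicate_succ]
      rw [hrep, ← hsndlen, set_at_length]
      simp
    rw [hset]
    have htake : a.take (j+1) = a.take j ++ [a[j]] := by
      rw [List.take_add_one]; simp [List.getElem?_eq_getElem hj]
    have hgd : a.getD j 0 = a[j] := by
      simp [List.getD_eq_getElem?_getD, List.getElem?_eq_getElem hj]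
    rw [htake, pairsAux_append]
    simp [pairsAux, ← hP, List.getElem?_eq_getElem hj]

theorem A_eq_dp (a : List Int) : lengths_of_lis a = dpOut a [] := by
  have h := A_inv a a.length (le_refl _)
  simpa [lengths_of_lis, pairsAux_snd] using h

-- the patience invariant step: updating tails preserves sortedness and the count law
theorem update_inv (tails : List Int) (p : List (Int × Int)) (v : Int)
    (hs : List.Pairwise (· < ·) tails)
    (hc : ∀ w, ((tails.countP fun t => decide (t < w)) : Int) = best p w) :
    List.Pairwise (· < ·)
      (if ((tails.countP fun t => decide (t < v)) : Int) = (tails.length : Int)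
        then tails ++ [v] else tails.set (tails.countP fun t => decide (t < v)) v) ∧
    ∀ w, (((if ((tails.countP fun t => decide (t < v)) : Int) = (tails.length : Int)
        then tails ++ [v] else tails.set (tails.countP fun t => decide (t < v)) v).countP
          fun t => decide (t < w)) : Int)
      = best (p ++ [(v, best p v + 1)]) w := by
  have hbv : best p v = ((tails.countP fun t => decide (t < v)) : Int) := (hc v).symm
  by_cases hcase : ((tails.countP fun t => decide (t < v)) : Int) = (tails.length : Int)
  · -- all tails are < v : append v at the end
    have hkl : (tails.countP fun t => decide (t < v)) = tails.length := by exact_mod_cast hcase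
    have hall : ∀ t ∈ tails, t < v := by
      have h := List.countP_eq_length.mp hkl
      intro t ht; simpa using h t ht
    rw [if_pos hcase]
    refine ⟨?_, ?_⟩
    · rw [List.pairwise_append]
      refine ⟨hs, by simp, ?_⟩
      intro x hx y hy; simp at hy; subst hy; exact hall x hx
    · intro w
      rw [best_append]
      have hbw := hc w
      by_cases hvw : v < w
      · have hallw : (tails.countP fun t => decide (t < w)) = tails.length :=
          List.countP_eq_length.mpr (by intro t ht; simpa using lt_trans (hall t ht) hvw)
        simp only [bestStep, List.countP_append, List.countP_cons, List.countP_nil,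
          if_pos hvw, decide_eq_true_eq]
        rw [← hbw, hbv]
        split_ifs <;> push_cast <;> omega
      · simp only [bestStep, List.countP_append, List.countP_cons, List.countP_nil,
          if_neg hvw, decide_eq_true_eq]
        rw [← hbw]
        push_cast; omega
  · -- overwrite tails[k] where k = #(tails < v)
    have hklt : (tails.countP fun t => decide (t < v)) < tails.length := by
      have hle : (tails.countP fun t => decide (t < v)) ≤ tails.length := List.countP_le_length
      have hne : (tails.countP fun t => decide (t < v)) ≠ tails.length := by
        intro h; exact hcase (by exact_mod_cast h)
      omega
    set k := (tails.countP fun t => decide (t < v)) with hk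
    set t1 := tails.take k with ht1
    set x := tails[k]'hklt with hx
    set t2 := tails.drop (k+1) with ht2
    have hdec : tails = t1 ++ x :: t2 := by
      rw [ht1, hx, ht2, ← List.drop_eq_getElem_cons hklt, List.take_append_drop]
    have ht1len : t1.length = k := by rw [ht1]; simp [List.length_take]; omega
    -- sortedness facts
    have hsp := hs
    rw [hdec, List.pairwise_append] at hsp
    obtain ⟨hp1, hpx2, hcross⟩ := hsp
    rw [List.pairwise_cons] at hpx2
    obtain ⟨hx2, hp2⟩ := hpx2
    have h1x : ∀ y ∈ t1, y < x := by
      intro y hy; exact hcross y hy x (List.mem_cons_self)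
    -- count decomposition at v
    have hkdec : t1.countP (fun t => decide (t < v))
        + ((x :: t2).countP fun t => decide (t < v)) = k := by
      rw [hk]; conv_lhs => rw [← List.countP_append]
      rw [← hdec]
    have hxv : ¬ x < v := by
      intro hxv
      have hallt1 : t1.countP (fun t => decide (t < v)) = t1.length :=
        List.countP_eq_length.mpr (by intro y hy; simpa using lt_trans (h1x y hy) hxv)
      rw [List.countP_cons] at hkdec
      simp [hxv] at hkdec
      omega
    have ht2v : t2.countP (fun t => decide (t < v)) = 0 :=
      List.countP_eq_zero.mpr (by
        intro z hz; simp only [decide_eq_true_eq]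
        have : x < z := hx2 z hz
        omega)
    have ht1v : ∀ y ∈ t1, y < v := by
      rw [List.countP_cons, ht2v] at hkdec
      simp [hxv] at hkdec
      have := List.countP_eq_length.mp (by omega : t1.countP (fun t => decide (t < v)) = t1.length)
      intro y hy; simpa using this y hy
    -- the set rewrites to t1 ++ v :: t2
    have hset : tails.set k v = t1 ++ v :: t2 := by
      conv_lhs => rw [hdec, ← ht1len]
      exact set_at_length t1 x t2 v
    rw [if_neg hcase, hset]
    refine ⟨?_, ?_⟩
    · rw [List.pairwise_append]
      refine ⟨hp1, ?_, ?_⟩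
      · rw [List.pairwise_cons]
        exact ⟨fun z hz => lt_of_le_of_lt (not_lt.mp hxv) (hx2 z hz), hp2⟩
      · intro y hy b hb
        rcases List.mem_cons.mp hb with rfl | hb2
        · exact ht1v y hy
        · exact lt_trans (h1x y hy) (hx2 b hb2)
    · intro w
      rw [best_append]
      have hbw := hc w
      rw [hdec] at hbw
      rw [List.countP_append, List.countP_cons] at hbw ⊢
      by_cases hvw : v < w
      · have h1w : t1.countP (fun t => decide (t < w)) = t1.length :=
          List.countP_eq_length.mpr (by intro y hy; simpa using lt_trans (ht1v y hy) hvw)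
        by_cases hxw : x < w
        · simp only [bestStep, decide_eq_true_eq] at hbw ⊢
          simp only [hvw, hxw, if_true] at hbw ⊢
          push_cast at hbw ⊢
          split_ifs <;> omega
        · have h2w : t2.countP (fun t => decide (t < w)) = 0 :=
            List.countP_eq_zero.mpr (by
              intro z hz; simp only [decide_eq_true_eq]
              have := hx2 z hz; omega)
          simp only [bestStep, decide_eq_true_eq] at hbw ⊢
          simp only [hvw, hxw, if_true, if_false] at hbw ⊢
          push_cast at hbw ⊢
          split_ifs <;> omega
      · have hxw : ¬ x < w := by
          have := not_lt.mp hxv; intro h; exact hvw (by omega)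
        simp only [bestStep, decide_eq_true_eq] at hbw ⊢
        simp only [hvw, hxw, if_false] at hbw ⊢
        push_cast at hbw ⊢
        omega

theorem B_inv (xs : List Int) : ∀ (p : List (Int × Int)) (tails out : List Int),
    List.Pairwise (· < ·) tails →
    (∀ w, ((tails.countP fun t => decide (t < w)) : Int) = best p w) →
    (xs.foldl
      (fun (st : List Int × List Int) v =>
        let k : Int := st.1.foldl (fun k t => if t < v then k + 1 else k) 0
        let tails := if k = (st.1.length : Int) then st.1 ++ [v] else st.1.set k.toNat v
        (tails, st.2 ++ [k + 1]))
      (tails, out)).2 = out ++ dpOut xs p := by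
  induction xs with
  | nil => intro p tails out _ _; simp [dpOut]
  | cons v rest ih =>
    intro p tails out hs hc
    obtain ⟨hs', hc'⟩ := update_inv tails p v hs hc
    have hcount : tails.foldl (fun k t => if t < v then k + 1 else k) (0:Int)
        = ((tails.countP fun t => decide (t < v)) : Int) := by
      rw [PySem.List.foldl_ite_add_one (fun t => t < v) tails 0]; ring
    simp only [List.foldl_cons, hcount, Int.toNat_natCast]
    rw [ih _ _ _ hs' hc']
    simp [dpOut, hc v]

theorem B_eq_dp (a : List Int) : lengths_of_lis_alt a = dpOut a [] := by
  have h := B_inv a [] [] [] (by simp) (by intro w; simp [best])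
  simpa [lengths_of_lis_alt] using h

-- ===== VERDICT (by name: the statement is the Claim_ definition above) =====
theorem lengths_of_lis_spec : Claim_equal_lengths_of_lis := by
  intro a _
  unfold Spec_lengths_of_lis
  rw [A_eq_dp, B_eq_dp]
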